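-- pv_equiv track=rewrite | github.com/burakugar/Caesar-Cipher-with-Turing-Machine | project computation/turing_machine/src/parse.py | parse_string_add
-- ===== SOURCE A (Python) =====
-- def parse_string_add(letter):
--     number_of_line=0
--     final_str=""
--     if letter == 'A':
--         number_of_line= 1
--     elif letter == 'B':
--         number_of_line= 2
--     elif letter == 'C':
--         number_of_line= 3
--     elif letter == 'D':
--         number_of_line= 4
--     elif letter == 'E':
--         number_of_line= 5
--     elif letter == 'F':
--         number_of_line= 6
--     elif letter == 'G':
--         number_of_line= 7
--     elif letter == 'H':
--         number_of_line= 8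
--     elif letter == 'I':
--         number_of_line= 9
--     elif letter == 'J':
--         number_of_line= 10
--     elif letter == 'K':
--         number_of_line= 11
--     elif letter == 'L':
--         number_of_line= 12
--     elif letter == 'M':
--         number_of_line= 13
--     elif letter == 'N':
--         number_of_line= 14
--     elif letter == 'O':
--         number_of_line= 15
--     elif letter == 'P':
--         number_of_line= 16
--     elif letter == 'Q':
--         number_of_line= 17
--     elif letter == 'R':
--         number_of_line= 18
--     elif letter == 'S':
--         number_of_line= 19
--     elif letter == 'T':
--         number_of_line= 20
--     elif letter == 'U':
--         number_of_line= 21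
--     elif letter == 'V':
--         number_of_line= 22
--     elif letter == 'W':
--         number_of_line= 23
--     for i in range (0,number_of_line):
--         final_str=final_str+'|'
--     return final_str
-- ===== SOURCE B (Python) =====
-- def parse_string_add(letter):
--     if len(letter) == 1 and 'A' <= letter <= 'W':
--         return '|' * (ord(letter) - ord('A') + 1)
--     return ''
-- ===== Notes on version B (the rewrite author's own statement) =====
-- stated objective: simpler
-- what changed: Replaced the 23-branch if/elif lookup table and the character-appending loop with an alphabetic range test plus a closed-form string repetition whose length is the letter's alphabet index plus one.
import Mathlib
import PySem

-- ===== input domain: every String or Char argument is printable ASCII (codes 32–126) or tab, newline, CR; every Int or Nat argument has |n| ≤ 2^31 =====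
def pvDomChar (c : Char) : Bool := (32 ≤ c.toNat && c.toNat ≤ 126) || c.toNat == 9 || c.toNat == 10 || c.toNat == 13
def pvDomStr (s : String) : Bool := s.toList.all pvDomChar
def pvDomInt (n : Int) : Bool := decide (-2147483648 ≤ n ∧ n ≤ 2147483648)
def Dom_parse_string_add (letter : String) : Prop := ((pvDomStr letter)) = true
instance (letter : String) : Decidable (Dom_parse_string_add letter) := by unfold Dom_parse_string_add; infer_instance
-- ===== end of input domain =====

-- B replaces A's 23-branch if/elif table and character-appending loop with a range test and the closed form '|' * (ord(letter)-ord('A')+1); objective: simpler.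

-- ===== PORT A =====
def parse_string_add (letter : String) : String :=
  let number_of_line : Int :=
    if letter = "A" then 1
    else if letter = "B" then 2
    else if letter = "C" then 3
    else if letter = "D" then 4
    else if letter = "E" then 5
    else if letter = "F" then 6
    else if letter = "G" then 7
    else if letter = "H" then 8
    else if letter = "I" then 9
    else if letter = "J" then 10
    else if letter = "K" then 11
    else if letter = "L" then 12
    else if letter = "M" then 13
    else if letter = "N" then 14
    else if letter = "O" then 15
    else if letter = "P" then 16
    else if letter = "Q" then 17
    else if letter = "R" then 18
    else if letter = "S" then 19
    else if letter = "T" then 20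
    else if letter = "U" then 21
    else if letter = "V" then 22
    else if letter = "W" then 23
    else 0
  (PySem.List.pyRange 0 number_of_line 1).foldl (fun final_str _ => final_str ++ "|") ""

-- ===== PORT B =====
def parse_string_add_alt (letter : String) : String :=
  match letter.toList with          -- len(letter) == 1
  | [c] =>
    if 'A' ≤ c ∧ c ≤ 'W' then       -- 'A' <= letter <= 'W'
      String.ofList (List.replicate (c.toNat - 'A'.toNat + 1) '|')   -- '|' * (ord(letter)-ord('A')+1)
    else ""
  | _ => ""

-- ===== PRECONDITION & SPEC =====
def Spec_parse_string_add (letter : String) (out : String) : Prop := out = parse_string_add_alt letter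
instance (letter : String) (out : String) : Decidable (Spec_parse_string_add letter out) := by unfold Spec_parse_string_add; infer_instance

-- ===== CLAIM (what is proved, stated in full; the proofs are below) =====
def Claim_equal_parse_string_add : Prop := ∀ (letter : String), Dom_parse_string_add letter → Spec_parse_string_add letter (parse_string_add letter)

-- ===== LEMMAS AND PROOFS =====

-- If letter is not a single-character string, A returns "".
theorem parseA_of_not_single (letter : String) (h : ∀ c : Char, letter ≠ String.ofList [c]) :
    parse_string_add letter = "" := by
  have nA : ¬ letter = "A" := by rintro rfl; exact absurd rfl (h 'A')
  have nB : ¬ letter = "B" := by rintro rfl; exact absurd rfl (h 'B')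
  have nC : ¬ letter = "C" := by rintro rfl; exact absurd rfl (h 'C')
  have nD : ¬ letter = "D" := by rintro rfl; exact absurd rfl (h 'D')
  have nE : ¬ letter = "E" := by rintro rfl; exact absurd rfl (h 'E')
  have nF : ¬ letter = "F" := by rintro rfl; exact absurd rfl (h 'F')
  have nG : ¬ letter = "G" := by rintro rfl; exact absurd rfl (h 'G')
  have nH : ¬ letter = "H" := by rintro rfl; exact absurd rfl (h 'H')
  have nI : ¬ letter = "I" := by rintro rfl; exact absurd rfl (h 'I')
  have nJ : ¬ letter = "J" := by rintro rfl; exact absurd rfl (h 'J')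
  have nK : ¬ letter = "K" := by rintro rfl; exact absurd rfl (h 'K')
  have nL : ¬ letter = "L" := by rintro rfl; exact absurd rfl (h 'L')
  have nM : ¬ letter = "M" := by rintro rfl; exact absurd rfl (h 'M')
  have nN : ¬ letter = "N" := by rintro rfl; exact absurd rfl (h 'N')
  have nO : ¬ letter = "O" := by rintro rfl; exact absurd rfl (h 'O')
  have nP : ¬ letter = "P" := by rintro rfl; exact absurd rfl (h 'P')
  have nQ : ¬ letter = "Q" := by rintro rfl; exact absurd rfl (h 'Q')
  have nR : ¬ letter = "R" := by rintro rfl; exact absurd rfl (h 'R')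
  have nS : ¬ letter = "S" := by rintro rfl; exact absurd rfl (h 'S')
  have nT : ¬ letter = "T" := by rintro rfl; exact absurd rfl (h 'T')
  have nU : ¬ letter = "U" := by rintro rfl; exact absurd rfl (h 'U')
  have nV : ¬ letter = "V" := by rintro rfl; exact absurd rfl (h 'V')
  have nW : ¬ letter = "W" := by rintro rfl; exact absurd rfl (h 'W')
  simp [parse_string_add, nA, nB, nC, nD, nE, nF, nG, nH, nI, nJ, nK, nL, nM, nN, nO, nP, nQ, nR, nS, nT, nU, nV, nW]

-- All single printable-ASCII characters, checked exhaustively.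
theorem parse_single_char : ∀ k : Nat, k < 128 →
    parse_string_add (String.ofList [Char.ofNat k]) = parse_string_add_alt (String.ofList [Char.ofNat k]) := by
  decide

-- ===== VERDICT (by name: the statement is the Claim_ definition above) =====
theorem parse_string_add_spec : Claim_equal_parse_string_add := by
  intro letter hdom
  unfold Spec_parse_string_add
  match h : letter.toList with
  | [c] =>
    have hc : pvDomChar c = true := by
      have hd := hdom
      unfold Dom_parse_string_add pvDomStr at hd
      rw [h] at hd
      simpa using hd
    have hk : c.toNat < 128 := by
      unfold pvDomChar at hc
      simp at hc
      omega
    have hL : letter = String.ofList [c] := String.ext (by simpa using h)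
    rw [hL, ← Char.ofNat_toNat c]
    exact parse_single_char c.toNat hk
  | [] =>
    have hA : parse_string_add letter = "" := by
      apply parseA_of_not_single
      intro c he
      rw [he] at h
      have := congrArg List.length h
      simp at this
    rw [hA]
    simp [parse_string_add_alt, h]
  | c :: d :: t =>
    have hA : parse_string_add letter = "" := by
      apply parseA_of_not_single
      intro e he
      rw [he] at h
      have := congrArg List.length h
      simp at this
    rw [hA]
    simp [parse_string_add_alt, h]
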